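-- pv_equiv track=rewrite | github.com/Golden-Bit/jetson-agent | app/chat_page.py | _stream_split_think
-- ===== SOURCE A (Python) =====
-- from typing import Dict, Any, List, Tuple
--
-- def _stream_split_think(chunk: str, state: Dict[str, Any]) -> Tuple[str, str]:
--     """
--     Parser in streaming per separare testo vs <think>...</think> (token-safe).
--     Ritorna (visible_delta, think_delta).
--     """
--     visible_delta = ""
--     think_delta = ""
--     i = 0
--
--     while i < len(chunk):
--         if not state["in_think"]:
--             start = chunk.find("<think>", i)
--             if start == -1:
--                 visible_delta += chunk[i:]
--                 break
--             visible_delta += chunk[i:start]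
--             i = start + len("<think>")
--             state["in_think"] = True
--         else:
--             end = chunk.find("</think>", i)
--             if end == -1:
--                 think_delta += chunk[i:]
--                 break
--             think_delta += chunk[i:end]
--             i = end + len("</think>")
--             state["in_think"] = False
--
--     return visible_delta, think_delta
-- ===== SOURCE B (Python) =====
-- def _stream_split_think(chunk: str, state):
--     """Two staged passes: tokenize chunk into text/tag tokens (state-free),
--     then interpret the token list with the think-state machine.
--     Returns (visible_delta, think_delta); updates state['in_think'] like the original."""
--     # pass 1: flat alternating token list [text, tag, text, tag, ..., text]
--     tokens = []
--     buf = []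
--     i = 0
--     n = len(chunk)
--     while i < n:
--         if chunk.startswith("</think>", i):
--             tokens += ["".join(buf), "</think>"]
--             buf = []
--             i += 8
--         elif chunk.startswith("<think>", i):
--             tokens += ["".join(buf), "<think>"]
--             buf = []
--             i += 7
--         else:
--             buf.append(chunk[i])
--             i += 1
--     tokens.append("".join(buf))
--     # pass 2: state machine over tokens; a tag that does not switch the state
--     # (a stray '<think>' inside or '</think>' outside) is literal text
--     in_think = state["in_think"]
--     vis = []
--     think = []
--     for tok in tokens:
--         if tok == "<think>":
--             if in_think:
--                 think.append(tok)
--             else: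
--                 in_think = True
--         elif tok == "</think>":
--             if in_think:
--                 in_think = False
--             else:
--                 vis.append(tok)
--         else:
--             (think if in_think else vis).append(tok)
--     state["in_think"] = in_think
--     return "".join(vis), "".join(think)
-- ===== Notes on version B (the rewrite author's own statement) =====
-- stated objective: alternative
-- what changed: A is a one-pass cursor loop that, depending on its in_think flag, searches for the one relevant tag with str.find and slices around it; B first tokenizes the chunk into a state-free flat list of text and tag tokens and then runs a separate token-level state machine that decides, per tag token, whether it switches the state or is literal text.
-- outside the precondition, e.g. on _stream_split_think('', {}): A returns ('', ''), B raises KeyError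
import Mathlib
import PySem

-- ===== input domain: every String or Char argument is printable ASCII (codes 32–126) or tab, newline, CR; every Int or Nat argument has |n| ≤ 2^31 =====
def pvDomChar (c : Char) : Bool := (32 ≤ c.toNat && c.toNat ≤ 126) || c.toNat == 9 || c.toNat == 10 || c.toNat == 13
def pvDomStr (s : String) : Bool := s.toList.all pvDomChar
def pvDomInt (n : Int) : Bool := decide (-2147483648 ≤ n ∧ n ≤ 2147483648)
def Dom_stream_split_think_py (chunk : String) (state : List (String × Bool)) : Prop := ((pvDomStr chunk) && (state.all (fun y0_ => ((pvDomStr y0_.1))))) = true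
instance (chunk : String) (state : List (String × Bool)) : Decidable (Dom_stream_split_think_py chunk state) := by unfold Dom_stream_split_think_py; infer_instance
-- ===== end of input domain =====

-- B replaces A's stateful find/slice cursor loop with two staged passes: a state-free
-- tokenizer producing a flat text/tag token list, then a token-level state machine.
-- Equivalence is about the RETURN value; both A and B also set state["in_think"] to the same final flag.

-- ===== PORT A =====
-- A's while-loop: index i into chunk, str.find(tag, i), string-concatenation buffers.
-- fuel is a totality guard only: one unit per loop iteration; the caller passes cs.length,
-- which is never exhausted (each iteration either breaks or advances i by at least 7).
def pvALoop : Nat → List Char → Nat → Bool → List Char → List Char → List Char × List Char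
  | 0, _, _, _, vis, think => (vis, think)
  | fuel + 1, cs, i, inThink, vis, think =>
    if i < cs.length then
      if inThink = false then
        -- start = chunk.find("<think>", i)
        let start := PySem.Chars.findFrom cs "<think>".toList (i : Int)
        if start = -1 then
          (vis ++ PySem.List.slice cs (some (i : Int)) none, think)      -- visible += chunk[i:]
        else
          -- visible += chunk[i:start]; i = start + 7; in_think = True
          pvALoop fuel cs (start.toNat + 7) true
            (vis ++ PySem.List.slice cs (some (i : Int)) (some start)) think
      else
        -- end = chunk.find("</think>", i)
        let e := PySem.Chars.findFrom cs "</think>".toList (i : Int)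
        if e = -1 then
          (vis, think ++ PySem.List.slice cs (some (i : Int)) none)      -- think += chunk[i:]
        else
          pvALoop fuel cs (e.toNat + 8) false vis
            (think ++ PySem.List.slice cs (some (i : Int)) (some e))
    else (vis, think)

def stream_split_think_py (chunk : String) (state : List (String × Bool)) : String × String :=
  -- state["in_think"]: KeyError (no "in_think" entry) is excluded by Pre_; .getD false is unreachable inside Pre_.
  let inThink := (PySem.Dict.get? ⟨state⟩ "in_think").getD false
  let r := pvALoop chunk.toList.length chunk.toList 0 inThink [] []
  (String.ofList r.1, String.ofList r.2)

-- ===== PORT B =====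
def pvTagOpen : List Char := "<think>".toList
def pvTagClose : List Char := "</think>".toList

-- pass 1 of Source B: the while-loop over the cursor i, transcribed with the remaining
-- suffix of the chunk in place of i (chunk.startswith(tag, i) = tag.isPrefixOf suffix);
-- buf is the pending text buffer, acc the token list built so far.
def pvTok : List Char → List Char → List (List Char) → List (List Char)
  | [], buf, acc => acc ++ [buf]
  | c :: rest, buf, acc =>
    if pvTagClose.isPrefixOf (c :: rest) then pvTok (rest.drop 7) [] (acc ++ [buf, pvTagClose])
    else if pvTagOpen.isPrefixOf (c :: rest) then pvTok (rest.drop 6) [] (acc ++ [buf, pvTagOpen])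
    else pvTok rest (buf ++ [c]) acc
termination_by cs _ _ => cs.length
decreasing_by all_goals (simp [List.length_drop]; try omega)

-- pass 2 of Source B: the for-loop over the token list with the in_think state machine.
def pvInterp : List (List Char) → Bool → List (List Char) → List (List Char) →
    List (List Char) × List (List Char) × Bool
  | [], b, vis, think => (vis, think, b)
  | t :: ts, b, vis, think =>
    if t = pvTagOpen then
      if b then pvInterp ts b vis (think ++ [t]) else pvInterp ts true vis think
    else if t = pvTagClose then
      if b then pvInterp ts false vis think else pvInterp ts b (vis ++ [t]) think
    else if b then pvInterp ts b vis (think ++ [t]) else pvInterp ts b (vis ++ [t]) think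

def stream_split_think_py_alt (chunk : String) (state : List (String × Bool)) : String × String :=
  let inThink := (PySem.Dict.get? ⟨state⟩ "in_think").getD false
  let toks := pvTok chunk.toList [] []
  let r := pvInterp toks inThink [] []
  (String.ofList r.1.flatten, String.ofList r.2.1.flatten)   -- "".join(vis), "".join(think)

-- ===== PRECONDITION & SPEC =====
-- Pre_ excludes states with no "in_think" key: there A raises KeyError, except on an empty
-- chunk, where its loop never runs and it accidentally returns ('','') without touching the
-- flag; B naturally reads state["in_think"] first and raises KeyError on all of them.
def Pre_stream_split_think_py (chunk : String) (state : List (String × Bool)) : Prop :=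
  (PySem.Dict.get? (⟨state⟩ : PySem.Dict String Bool) "in_think").isSome = true
instance (chunk : String) (state : List (String × Bool)) : Decidable (Pre_stream_split_think_py chunk state) := by unfold Pre_stream_split_think_py; infer_instance

def pvWitness_stream_split_think_py : String × (List (String × Bool)) :=
  ("a<think>b", [("in_think", false)])

def Spec_stream_split_think_py (chunk : String) (state : List (String × Bool)) (out : String × String) : Prop := out = stream_split_think_py_alt chunk state
instance (chunk : String) (state : List (String × Bool)) (out : String × String) : Decidable (Spec_stream_split_think_py chunk state out) := by unfold Spec_stream_split_think_py; infer_instance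

-- ===== CLAIM (what is proved, stated in full; the proofs are below) =====
def Claim_equal_stream_split_think_py : Prop := ∀ (chunk : String) (state : List (String × Bool)), Dom_stream_split_think_py chunk state → Pre_stream_split_think_py chunk state → Spec_stream_split_think_py chunk state (stream_split_think_py chunk state)

-- ===== LEMMAS AND PROOFS =====

-- proof-side reference machine: a character DFA that consumes a tag (or a literal
-- tag occurrence that does not switch the state) atomically and copies other
-- characters one at a time; both ports are reduced to it.
def pvDfa : List Char → Bool → List Char → List Char → List Char × List Char × Bool
  | [], b, vis, think => (vis, think, b)
  | c :: rest, b, vis, think =>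
    if pvTagClose.isPrefixOf (c :: rest) then
      if b then pvDfa (rest.drop 7) false vis think
      else pvDfa (rest.drop 7) b (vis ++ pvTagClose) think
    else if pvTagOpen.isPrefixOf (c :: rest) then
      if b then pvDfa (rest.drop 6) b vis (think ++ pvTagOpen)
      else pvDfa (rest.drop 6) true vis think
    else if b then pvDfa rest b vis (think ++ [c]) else pvDfa rest b (vis ++ [c]) think
termination_by cs _ _ _ => cs.length
decreasing_by all_goals (simp [List.length_drop]; try omega)

theorem pvPrefix_get {l p : List Char} (h : p <+: l) (i : Nat) (hi : i < p.length) :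
    l[i]? = p[i]? := by
  obtain ⟨t, rfl⟩ := h
  rw [List.getElem?_append_left hi]

theorem pvNot_open_close {l : List Char} (hc : pvTagClose <+: l) (ho : pvTagOpen <+: l) :
    False := by
  have h1 := pvPrefix_get hc 1 (by decide)
  have h2 := pvPrefix_get ho 1 (by decide)
  rw [h1] at h2
  simp [pvTagOpen, pvTagClose] at h2

theorem pvClose_append_drop {l : List Char} (h : pvTagClose <+: l) :
    l = pvTagClose ++ l.drop 8 := by
  obtain ⟨t, rfl⟩ := h
  have h8 : pvTagClose.length = 8 := by decide
  rw [← h8, List.drop_left]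

theorem pvOpen_append_drop {l : List Char} (h : pvTagOpen <+: l) :
    l = pvTagOpen ++ l.drop 7 := by
  obtain ⟨t, rfl⟩ := h
  have h7 : pvTagOpen.length = 7 := by decide
  rw [← h7, List.drop_left]

-- an open tag at position g ≥ 1 cannot start inside a close tag at position 0
theorem pvOpen_off_close {l : List Char} (hc : pvTagClose <+: l) {g : Nat}
    (ho : pvTagOpen <+: l.drop g) (hg : 1 ≤ g) : 8 ≤ g := by
  by_contra hlt
  have hopen0 : (l.drop g)[0]? = pvTagOpen[0]? := pvPrefix_get ho 0 (by decide)
  have hcl : l[g]? = pvTagClose[g]? := pvPrefix_get hc g (by simp [pvTagClose]; omega)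
  have hdg : (l.drop g)[0]? = l[g]? := by simp
  have : pvTagClose[g]? = some '<' := by
    rw [← hcl, ← hdg, hopen0]; decide
  have hone : ∀ j : Nat, j < 8 → pvTagClose[j]? = some '<' → j = 0 := by decide
  have := hone g (by omega) this
  omega

-- a close tag at position g ≥ 1 cannot start inside an open tag at position 0
theorem pvClose_off_open {l : List Char} (ho : pvTagOpen <+: l) {g : Nat}
    (hc : pvTagClose <+: l.drop g) (hg : 1 ≤ g) : 7 ≤ g := by
  by_contra hlt
  have hcl0 : (l.drop g)[0]? = pvTagClose[0]? := pvPrefix_get hc 0 (by decide)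
  have hop : l[g]? = pvTagOpen[g]? := pvPrefix_get ho g (by simp [pvTagOpen]; omega)
  have hdg : (l.drop g)[0]? = l[g]? := by simp
  have : pvTagOpen[g]? = some '<' := by
    rw [← hop, ← hdg, hcl0]; decide
  have hone : ∀ j : Nat, j < 7 → pvTagOpen[j]? = some '<' → j = 0 := by decide
  have := hone g (by omega) this
  omega

theorem pvInterp_append (xs ys : List (List Char)) (b : Bool) (vis think : List (List Char)) :
    pvInterp (xs ++ ys) b vis think =
      pvInterp ys (pvInterp xs b vis think).2.2 (pvInterp xs b vis think).1
        (pvInterp xs b vis think).2.1 := by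
  induction xs generalizing b vis think with
  | nil => simp [pvInterp]
  | cons t ts ih =>
      simp only [List.cons_append, pvInterp]
      split_ifs <;> simp [ih]

-- outside think and no open tag anywhere: everything is copied to visible
theorem pvDrop8 (c : Char) (rest : List Char) (p : Nat) :
    (rest.drop 7).drop p = (c :: rest).drop (8 + p) := by
  have h : rest.drop 7 = (c :: rest).drop 8 := rfl
  rw [h, List.drop_drop]

theorem pvDrop7 (c : Char) (rest : List Char) (p : Nat) :
    (rest.drop 6).drop p = (c :: rest).drop (7 + p) := by
  have h : rest.drop 6 = (c :: rest).drop 7 := rfl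
  rw [h, List.drop_drop]

theorem pvInfix_of_prefix_drop {l s : List Char} {p : Nat} (h : s <+: l.drop p) :
    s <:+: l :=
  h.isInfix.trans (l.drop_suffix p).isInfix

theorem pvNoOpen_out : ∀ (n : Nat) (l : List Char), l.length ≤ n →
    (∀ p, ¬ pvTagOpen <+: l.drop p) → ∀ vis think,
    pvDfa l false vis think = (vis ++ l, think, false) := by
  intro n
  induction n with
  | zero =>
      intro l hl _ vis think
      have : l = [] := List.eq_nil_of_length_eq_zero (by omega)
      subst this; simp [pvDfa]
  | succ n ih =>
      intro l hl hno vis think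
      cases l with
      | nil => simp [pvDfa]
      | cons c rest =>
        simp only [List.length_cons] at hl
        by_cases hc : pvTagClose <+: (c :: rest)
        · have hpre : pvTagClose.isPrefixOf (c :: rest) = true :=
            List.isPrefixOf_iff_prefix.mpr hc
          have hstep : pvDfa (c :: rest) false vis think =
              pvDfa (rest.drop 7) false (vis ++ pvTagClose) think := by
            simp [pvDfa, hpre]
          rw [hstep, ih (rest.drop 7) (by simp; omega)
            (fun p => by rw [pvDrop8]; exact hno (8 + p))]
          conv_rhs => rw [pvClose_append_drop hc]
          simp
        · have ho : ¬ pvTagOpen <+: (c :: rest) := by simpa using hno 0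
          have hcb : pvTagClose.isPrefixOf (c :: rest) = false := by
            simp only [Bool.eq_false_iff, ne_eq, List.isPrefixOf_iff_prefix]; exact hc
          have hob : pvTagOpen.isPrefixOf (c :: rest) = false := by
            simp only [Bool.eq_false_iff, ne_eq, List.isPrefixOf_iff_prefix]; exact ho
          have hstep : pvDfa (c :: rest) false vis think =
              pvDfa rest false (vis ++ [c]) think := by
            simp [pvDfa, hcb, hob]
          rw [hstep, ih rest (by omega)
            (fun p => by simpa using hno (p + 1))]
          simp

theorem pvNoClose_in : ∀ (n : Nat) (l : List Char), l.length ≤ n →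
    (∀ p, ¬ pvTagClose <+: l.drop p) → ∀ vis think,
    pvDfa l true vis think = (vis, think ++ l, true) := by
  intro n
  induction n with
  | zero =>
      intro l hl _ vis think
      have : l = [] := List.eq_nil_of_length_eq_zero (by omega)
      subst this; simp [pvDfa]
  | succ n ih =>
      intro l hl hno vis think
      cases l with
      | nil => simp [pvDfa]
      | cons c rest =>
        simp only [List.length_cons] at hl
        have hc : ¬ pvTagClose <+: (c :: rest) := by simpa using hno 0
        have hcb : pvTagClose.isPrefixOf (c :: rest) = false := by
          simp only [Bool.eq_false_iff, ne_eq, List.isPrefixOf_iff_prefix]; exact hc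
        by_cases ho : pvTagOpen <+: (c :: rest)
        · have hob : pvTagOpen.isPrefixOf (c :: rest) = true :=
            List.isPrefixOf_iff_prefix.mpr ho
          have hstep : pvDfa (c :: rest) true vis think =
              pvDfa (rest.drop 6) true vis (think ++ pvTagOpen) := by
            simp [pvDfa, hcb, hob]
          rw [hstep, ih (rest.drop 6) (by simp; omega)
            (fun p => by rw [pvDrop7]; exact hno (7 + p))]
          conv_rhs => rw [pvOpen_append_drop ho]
          simp
        · have hob : pvTagOpen.isPrefixOf (c :: rest) = false := by
            simp only [Bool.eq_false_iff, ne_eq, List.isPrefixOf_iff_prefix]; exact ho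
          have hstep : pvDfa (c :: rest) true vis think =
              pvDfa rest true vis (think ++ [c]) := by
            simp [pvDfa, hcb, hob]
          rw [hstep, ih rest (by omega)
            (fun p => by simpa using hno (p + 1))]
          simp

-- the dfa at a leading open tag, outside think: consume it and switch state
theorem pvSkipOut0 {l : List Char} (ho : pvTagOpen <+: l) (vis think : List Char) :
    pvDfa l false vis think = pvDfa (l.drop 7) true vis think := by
  cases l with
  | nil => rw [List.prefix_nil] at ho; exact absurd ho (by decide)
  | cons c rest =>
    have hnc : ¬ pvTagClose <+: (c :: rest) := fun hcl => pvNot_open_close hcl ho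
    have hcb : pvTagClose.isPrefixOf (c :: rest) = false := by
      simp only [Bool.eq_false_iff, ne_eq, List.isPrefixOf_iff_prefix]; exact hnc
    have hob : pvTagOpen.isPrefixOf (c :: rest) = true :=
      List.isPrefixOf_iff_prefix.mpr ho
    simp [pvDfa, hcb, hob]

-- the dfa at a leading close tag, inside think: consume it and switch state
theorem pvSkipIn0 {l : List Char} (hc : pvTagClose <+: l) (vis think : List Char) :
    pvDfa l true vis think = pvDfa (l.drop 8) false vis think := by
  cases l with
  | nil => rw [List.prefix_nil] at hc; exact absurd hc (by decide)
  | cons c rest =>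
    have hcb : pvTagClose.isPrefixOf (c :: rest) = true :=
      List.isPrefixOf_iff_prefix.mpr hc
    simp [pvDfa, hcb]

-- outside think with the FIRST open tag at position g: the dfa copies l.take g to
-- visible, consumes the tag, and continues inside think
theorem pvSkipOut : ∀ (n g : Nat) (l : List Char), g ≤ n →
    pvTagOpen <+: l.drop g → (∀ j, j < g → ¬ pvTagOpen <+: l.drop j) → ∀ vis think,
    pvDfa l false vis think = pvDfa (l.drop (g + 7)) true (vis ++ l.take g) think := by
  intro n
  induction n with
  | zero =>
      intro g l hg ho _ vis think
      have hg0 : g = 0 := by omega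
      subst hg0
      simpa using pvSkipOut0 (by simpa using ho) vis think
  | succ n ih =>
      intro g l hg ho hmin vis think
      rcases Nat.eq_zero_or_pos g with hg0 | hg1
      · subst hg0
        simpa using pvSkipOut0 (by simpa using ho) vis think
      · have hlen : g + 7 ≤ l.length := by
          have h7 := ho.length_le
          simp only [List.length_drop] at h7
          have : pvTagOpen.length = 7 := by decide
          omega
        cases l with
        | nil => simp at hlen
        | cons c rest =>
          by_cases hc : pvTagClose <+: (c :: rest)
          · have h8 : 8 ≤ g := pvOpen_off_close hc ho hg1
            have hpre : pvTagClose.isPrefixOf (c :: rest) = true :=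
              List.isPrefixOf_iff_prefix.mpr hc
            have hstep : pvDfa (c :: rest) false vis think =
                pvDfa (rest.drop 7) false (vis ++ pvTagClose) think := by
              simp [pvDfa, hpre]
            have hdg : (rest.drop 7).drop (g - 8) = (c :: rest).drop g := by
              rw [pvDrop8]; congr 1; omega
            rw [hstep, ih (g - 8) (rest.drop 7) (by omega)
              (by rw [hdg]; exact ho)
              (fun j hj => by
                rw [pvDrop8]; exact hmin (8 + j) (by omega))]
            have hd2 : (rest.drop 7).drop (g - 8 + 7) = (c :: rest).drop (g + 7) := by
              rw [pvDrop8]; congr 1; omega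
            have ht : (c :: rest).take g = pvTagClose ++ (rest.drop 7).take (g - 8) := by
              conv_lhs => rw [pvClose_append_drop hc]
              rw [List.take_append, List.take_of_length_le (show pvTagClose.length ≤ g by rw [show pvTagClose.length = 8 from by decide]; omega)]
              rfl
            rw [hd2, ht]
            simp
          · have hno0 : ¬ pvTagOpen <+: (c :: rest) := by
              simpa using hmin 0 hg1
            have hcb : pvTagClose.isPrefixOf (c :: rest) = false := by
              simp only [Bool.eq_false_iff, ne_eq, List.isPrefixOf_iff_prefix]; exact hc
            have hob : pvTagOpen.isPrefixOf (c :: rest) = false := by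
              simp only [Bool.eq_false_iff, ne_eq, List.isPrefixOf_iff_prefix]; exact hno0
            have hstep : pvDfa (c :: rest) false vis think =
                pvDfa rest false (vis ++ [c]) think := by
              simp [pvDfa, hcb, hob]
            obtain ⟨k, rfl⟩ : ∃ k, g = k + 1 := ⟨g - 1, by omega⟩
            rw [hstep, ih k rest (by omega)
              (by simpa using ho)
              (fun j hj => by simpa using hmin (j + 1) (by omega))]
            simp [List.append_assoc]

-- inside think with the FIRST close tag at position g: symmetric
theorem pvSkipIn : ∀ (n g : Nat) (l : List Char), g ≤ n →
    pvTagClose <+: l.drop g → (∀ j, j < g → ¬ pvTagClose <+: l.drop j) → ∀ vis think,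
    pvDfa l true vis think = pvDfa (l.drop (g + 8)) false vis (think ++ l.take g) := by
  intro n
  induction n with
  | zero =>
      intro g l hg hc _ vis think
      have hg0 : g = 0 := by omega
      subst hg0
      simpa using pvSkipIn0 (by simpa using hc) vis think
  | succ n ih =>
      intro g l hg hc hmin vis think
      rcases Nat.eq_zero_or_pos g with hg0 | hg1
      · subst hg0
        simpa using pvSkipIn0 (by simpa using hc) vis think
      · have hlen : g + 8 ≤ l.length := by
          have h8 := hc.length_le
          simp only [List.length_drop] at h8
          have : pvTagClose.length = 8 := by decide
          omega
        cases l with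
        | nil => simp at hlen
        | cons c rest =>
          have hnc0 : ¬ pvTagClose <+: (c :: rest) := by
            simpa using hmin 0 hg1
          have hcb : pvTagClose.isPrefixOf (c :: rest) = false := by
            simp only [Bool.eq_false_iff, ne_eq, List.isPrefixOf_iff_prefix]; exact hnc0
          by_cases ho : pvTagOpen <+: (c :: rest)
          · have h7 : 7 ≤ g := pvClose_off_open ho hc hg1
            have hob : pvTagOpen.isPrefixOf (c :: rest) = true :=
              List.isPrefixOf_iff_prefix.mpr ho
            have hstep : pvDfa (c :: rest) true vis think =
                pvDfa (rest.drop 6) true vis (think ++ pvTagOpen) := by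
              simp [pvDfa, hcb, hob]
            have hdg : (rest.drop 6).drop (g - 7) = (c :: rest).drop g := by
              rw [pvDrop7]; congr 1; omega
            rw [hstep, ih (g - 7) (rest.drop 6) (by omega)
              (by rw [hdg]; exact hc)
              (fun j hj => by
                rw [pvDrop7]; exact hmin (7 + j) (by omega))]
            have hd2 : (rest.drop 6).drop (g - 7 + 8) = (c :: rest).drop (g + 8) := by
              rw [pvDrop7]; congr 1; omega
            have ht : (c :: rest).take g = pvTagOpen ++ (rest.drop 6).take (g - 7) := by
              conv_lhs => rw [pvOpen_append_drop ho]
              rw [List.take_append, List.take_of_length_le (show pvTagOpen.length ≤ g by rw [show pvTagOpen.length = 7 from by decide]; omega)]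
              rfl
            rw [hd2, ht]
            simp
          · have hob : pvTagOpen.isPrefixOf (c :: rest) = false := by
              simp only [Bool.eq_false_iff, ne_eq, List.isPrefixOf_iff_prefix]; exact ho
            have hstep : pvDfa (c :: rest) true vis think =
                pvDfa rest true vis (think ++ [c]) := by
              simp [pvDfa, hcb, hob]
            obtain ⟨k, rfl⟩ : ∃ k, g = k + 1 := ⟨g - 1, by omega⟩
            rw [hstep, ih k rest (by omega)
              (by simpa using hc)
              (fun j hj => by simpa using hmin (j + 1) (by omega))]
            simp [List.append_assoc]

-- A's loop equals the dfa on the remaining suffix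
theorem pvA_dfa : ∀ (n : Nat) (cs : List Char) (i fuel : Nat) (b : Bool)
    (vis think : List Char), cs.length - i ≤ n → i ≤ cs.length → cs.length - i ≤ fuel →
    pvALoop fuel cs i b vis think =
      ((pvDfa (cs.drop i) b vis think).1, (pvDfa (cs.drop i) b vis think).2.1) := by
  intro n
  induction n with
  | zero =>
    intro cs i fuel b vis think hn hi hf
    have hdrop : cs.drop i = [] := by rw [List.drop_eq_nil_iff]; omega
    have hnl : ¬ i < cs.length := by omega
    cases fuel with
    | zero => simp [pvALoop, hdrop, pvDfa]
    | succ f => rw [pvALoop]; simp [hnl, hdrop, pvDfa]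
  | succ n ih =>
    intro cs i fuel b vis think hn hi hf
    rcases Nat.lt_or_ge i cs.length with hlt | hge
    · obtain ⟨f, rfl⟩ : ∃ f, fuel = f + 1 := ⟨fuel - 1, by omega⟩
      rw [pvALoop]
      cases b with
      | false =>
        rw [PySem.Chars.findFrom_natCast cs "<think>".toList i (le_of_lt hlt)]
        set g := PySem.Chars.find (cs.drop i) "<think>".toList with hg
        by_cases h1 : g = -1
        · have h1' : PySem.Chars.find (List.drop i cs) "<think>".toList = -1 := by
            rw [← hg]; exact h1
          have hno : ∀ p, ¬ pvTagOpen <+: (cs.drop i).drop p := by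
            intro p hp
            exact ((PySem.Chars.find_eq_neg_one_iff _ _).mp h1')
              (pvInfix_of_prefix_drop hp)
          rw [pvNoOpen_out (cs.drop i).length (cs.drop i) le_rfl hno vis think]
          simp [hlt, h1, PySem.List.slice_from_natCast]
        · have hge0 : (0:Int) ≤ g := by
            have := PySem.Chars.neg_one_le_find (cs.drop i) "<think>".toList
            rw [← hg] at this; omega
          have hspec := PySem.Chars.find_spec (s := cs.drop i)
            (sub := "<think>".toList) (by rw [← hg]; exact hge0)
          rw [← hg] at hspec
          have hpre : pvTagOpen <+: (cs.drop i).drop g.toNat := hspec.1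
          have hmin : ∀ j, j < g.toNat → ¬ pvTagOpen <+: (cs.drop i).drop j :=
            fun j hj => hspec.2 j hj
          have hlen7 : g.toNat + 7 ≤ (cs.drop i).length := by
            have := hpre.length_le
            simp only [List.length_drop] at this ⊢
            have h7 : pvTagOpen.length = 7 := by decide
            omega
          have hlen7' : g.toNat + 7 ≤ cs.length - i := by
            simpa using hlen7
          have hne : ¬ ((i : Int) + g = -1) := by omega
          have htn : ((i : Int) + g).toNat = i + g.toNat := by omega
          have hfc : g = ((g.toNat : Nat) : Int) := by omega
          rw [pvSkipOut g.toNat g.toNat (cs.drop i) le_rfl hpre hmin vis think]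
          have hdd : ((cs.drop i).drop (g.toNat + 7)) = cs.drop (i + g.toNat + 7) := by
            rw [List.drop_drop]; congr 1
          rw [hdd]
          have hrec := ih cs (i + g.toNat + 7) f true
            (vis ++ (cs.drop i).take g.toNat) think (by omega) (by omega) (by omega)
          simp only [hlt, reduceIte, h1, hne, htn]
          rw [hfc, PySem.List.slice_natCast_add]
          exact hrec
      | true =>
        rw [PySem.Chars.findFrom_natCast cs "</think>".toList i (le_of_lt hlt)]
        set g := PySem.Chars.find (cs.drop i) "</think>".toList with hg
        by_cases h1 : g = -1
        · have h1' : PySem.Chars.find (List.drop i cs) "</think>".toList = -1 := by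
            rw [← hg]; exact h1
          have hno : ∀ p, ¬ pvTagClose <+: (cs.drop i).drop p := by
            intro p hp
            exact ((PySem.Chars.find_eq_neg_one_iff _ _).mp h1')
              (pvInfix_of_prefix_drop hp)
          rw [pvNoClose_in (cs.drop i).length (cs.drop i) le_rfl hno vis think]
          simp [hlt, h1, PySem.List.slice_from_natCast]
        · have hge0 : (0:Int) ≤ g := by
            have := PySem.Chars.neg_one_le_find (cs.drop i) "</think>".toList
            rw [← hg] at this; omega
          have hspec := PySem.Chars.find_spec (s := cs.drop i)
            (sub := "</think>".toList) (by rw [← hg]; exact hge0)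
          rw [← hg] at hspec
          have hpre : pvTagClose <+: (cs.drop i).drop g.toNat := hspec.1
          have hmin : ∀ j, j < g.toNat → ¬ pvTagClose <+: (cs.drop i).drop j :=
            fun j hj => hspec.2 j hj
          have hlen8 : g.toNat + 8 ≤ (cs.drop i).length := by
            have := hpre.length_le
            simp only [List.length_drop] at this ⊢
            have h8 : pvTagClose.length = 8 := by decide
            omega
          have hlen8' : g.toNat + 8 ≤ cs.length - i := by
            simpa using hlen8
          have hne : ¬ ((i : Int) + g = -1) := by omega
          have htn : ((i : Int) + g).toNat = i + g.toNat := by omega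
          have hfc : g = ((g.toNat : Nat) : Int) := by omega
          rw [pvSkipIn g.toNat g.toNat (cs.drop i) le_rfl hpre hmin vis think]
          have hdd : ((cs.drop i).drop (g.toNat + 8)) = cs.drop (i + g.toNat + 8) := by
            rw [List.drop_drop]; congr 1
          rw [hdd]
          have hrec := ih cs (i + g.toNat + 8) f false
            vis (think ++ (cs.drop i).take g.toNat) (by omega) (by omega) (by omega)
          simp only [hlt, reduceIte, h1, hne, htn]
          rw [hfc, PySem.List.slice_natCast_add]
          exact hrec
    · have hdrop : cs.drop i = [] := by rw [List.drop_eq_nil_iff]; omega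
      have hnl : ¬ i < cs.length := by omega
      cases fuel with
      | zero => simp [pvALoop, hdrop, pvDfa]
      | succ f => rw [pvALoop]; simp [hnl, hdrop, pvDfa]

theorem pvInterp_text {t : List Char} (hto : t ≠ pvTagOpen) (htc : t ≠ pvTagClose)
    (ts : List (List Char)) (b : Bool) (vis think : List (List Char)) :
    pvInterp (t :: ts) b vis think =
      if b then pvInterp ts b vis (think ++ [t]) else pvInterp ts b (vis ++ [t]) think := by
  cases b <;> simp [pvInterp, hto, htc]

-- notation-free shorthand for B's invariant: the pending text buffer is empty or
-- starts at a position where neither tag starts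
theorem pvBuf_ne_tags {buf cs : List Char}
    (hinv : buf = [] ∨ (¬ pvTagClose <+: (buf ++ cs) ∧ ¬ pvTagOpen <+: (buf ++ cs))) :
    buf ≠ pvTagOpen ∧ buf ≠ pvTagClose := by
  rcases hinv with rfl | ⟨h1, h2⟩
  · exact ⟨by decide, by decide⟩
  · constructor
    · rintro rfl; exact h2 (List.prefix_append _ _)
    · rintro rfl; exact h1 (List.prefix_append _ _)

-- B's tokenize-then-interpret equals the dfa
theorem pvB_dfa : ∀ (n : Nat) (cs : List Char), cs.length ≤ n →
    ∀ (buf : List Char) (acc : List (List Char)) (b : Bool) (vis think : List (List Char)),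
    (buf = [] ∨ (¬ pvTagClose <+: (buf ++ cs) ∧ ¬ pvTagOpen <+: (buf ++ cs))) →
    ((pvInterp (pvTok cs buf acc) b vis think).1.flatten,
     (pvInterp (pvTok cs buf acc) b vis think).2.1.flatten,
     (pvInterp (pvTok cs buf acc) b vis think).2.2)
    = pvDfa cs (pvInterp acc b vis think).2.2
        ((pvInterp acc b vis think).1.flatten ++
          (if (pvInterp acc b vis think).2.2 then [] else buf))
        ((pvInterp acc b vis think).2.1.flatten ++
          (if (pvInterp acc b vis think).2.2 then buf else [])) := by
  intro n
  induction n with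
  | zero =>
    intro cs hl buf acc b vis think hinv
    have hcs : cs = [] := List.eq_nil_of_length_eq_zero (by omega)
    subst hcs
    obtain ⟨hbo, hbc⟩ := pvBuf_ne_tags hinv
    rw [show pvTok [] buf acc = acc ++ [buf] from by simp [pvTok]]
    rw [pvInterp_append acc [buf] b vis think, pvInterp_text hbo hbc]
    cases hb : (pvInterp acc b vis think).2.2 <;> simp [pvInterp, pvDfa]
  | succ n ih =>
    intro cs hl buf acc b vis think hinv
    cases cs with
    | nil =>
      obtain ⟨hbo, hbc⟩ := pvBuf_ne_tags hinv
      rw [show pvTok [] buf acc = acc ++ [buf] from by simp [pvTok]]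
      rw [pvInterp_append acc [buf] b vis think, pvInterp_text hbo hbc]
      cases hb : (pvInterp acc b vis think).2.2 <;> simp [pvInterp, pvDfa]
    | cons c rest =>
      obtain ⟨hbo, hbc⟩ := pvBuf_ne_tags hinv
      simp only [List.length_cons] at hl
      by_cases hc : pvTagClose <+: (c :: rest)
      · have hpre : pvTagClose.isPrefixOf (c :: rest) = true :=
          List.isPrefixOf_iff_prefix.mpr hc
        rw [show pvTok (c :: rest) buf acc
            = pvTok (rest.drop 7) [] (acc ++ [buf, pvTagClose]) from by simp [pvTok, hpre]]
        rw [ih (rest.drop 7) (by simp; omega) [] (acc ++ [buf, pvTagClose]) b vis think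
          (Or.inl rfl)]
        rw [show acc ++ [buf, pvTagClose] = acc ++ ([buf] ++ [pvTagClose]) from by simp]
        rw [pvInterp_append acc ([buf] ++ [pvTagClose]) b vis think,
          List.cons_append, List.nil_append, pvInterp_text hbo hbc]
        have hstepT : ∀ v t, pvDfa (c :: rest) true v t = pvDfa (rest.drop 7) false v t := by
          intro v t; simp [pvDfa, hpre]
        have hstepF : ∀ v t, pvDfa (c :: rest) false v t
            = pvDfa (rest.drop 7) false (v ++ pvTagClose) t := by
          intro v t; simp [pvDfa, hpre]
        have hco : ¬ (pvTagClose = pvTagOpen) := by decide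
        cases hb : (pvInterp acc b vis think).2.2 <;>
          simp [pvInterp, hco, hstepT, hstepF]
      · by_cases ho : pvTagOpen <+: (c :: rest)
        · have hcb : pvTagClose.isPrefixOf (c :: rest) = false := by
            simp only [Bool.eq_false_iff, ne_eq, List.isPrefixOf_iff_prefix]; exact hc
          have hob : pvTagOpen.isPrefixOf (c :: rest) = true :=
            List.isPrefixOf_iff_prefix.mpr ho
          rw [show pvTok (c :: rest) buf acc
              = pvTok (rest.drop 6) [] (acc ++ [buf, pvTagOpen]) from by
            simp [pvTok, hcb, hob]]
          rw [ih (rest.drop 6) (by simp; omega) [] (acc ++ [buf, pvTagOpen]) b vis think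
            (Or.inl rfl)]
          rw [show acc ++ [buf, pvTagOpen] = acc ++ ([buf] ++ [pvTagOpen]) from by simp]
          rw [pvInterp_append acc ([buf] ++ [pvTagOpen]) b vis think,
            List.cons_append, List.nil_append, pvInterp_text hbo hbc]
          have hstepT : ∀ v t, pvDfa (c :: rest) true v t
              = pvDfa (rest.drop 6) true v (t ++ pvTagOpen) := by
            intro v t; simp [pvDfa, hcb, hob]
          have hstepF : ∀ v t, pvDfa (c :: rest) false v t
              = pvDfa (rest.drop 6) true v t := by
            intro v t; simp [pvDfa, hcb, hob]
          cases hb : (pvInterp acc b vis think).2.2 <;>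
            simp [pvInterp, hstepT, hstepF]
        · have hcb : pvTagClose.isPrefixOf (c :: rest) = false := by
            simp only [Bool.eq_false_iff, ne_eq, List.isPrefixOf_iff_prefix]; exact hc
          have hob : pvTagOpen.isPrefixOf (c :: rest) = false := by
            simp only [Bool.eq_false_iff, ne_eq, List.isPrefixOf_iff_prefix]; exact ho
          have heq : (buf ++ [c]) ++ rest = buf ++ (c :: rest) := by simp
          have h1' : ¬ pvTagClose <+: (buf ++ [c]) ++ rest := by
            rw [heq]; rcases hinv with rfl | ⟨h1, _⟩
            · simpa using hc
            · exact h1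
          have h2' : ¬ pvTagOpen <+: (buf ++ [c]) ++ rest := by
            rw [heq]; rcases hinv with rfl | ⟨_, h2⟩
            · simpa using ho
            · exact h2
          rw [show pvTok (c :: rest) buf acc = pvTok rest (buf ++ [c]) acc from by
            simp [pvTok, hcb, hob]]
          rw [ih rest (by omega) (buf ++ [c]) acc b vis think (Or.inr ⟨h1', h2'⟩)]
          have hstepT : ∀ v t, pvDfa (c :: rest) true v t = pvDfa rest true v (t ++ [c]) := by
            intro v t; simp [pvDfa, hcb, hob]
          have hstepF : ∀ v t, pvDfa (c :: rest) false v t = pvDfa rest false (v ++ [c]) t := by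
            intro v t; simp [pvDfa, hcb, hob]
          cases hb : (pvInterp acc b vis think).2.2 <;> simp [hstepT, hstepF]

-- ===== VERDICT (by name: the statement is the Claim_ definition above) =====
theorem stream_split_think_py_spec : Claim_equal_stream_split_think_py := by
  intro chunk state _ _
  unfold Spec_stream_split_think_py stream_split_think_py stream_split_think_py_alt
  set b := (PySem.Dict.get? (⟨state⟩ : PySem.Dict String Bool) "in_think").getD false with hb
  have hA := pvA_dfa chunk.toList.length chunk.toList 0 chunk.toList.length b [] []
    (by omega) (by omega) (by omega)
  have hB := pvB_dfa chunk.toList.length chunk.toList le_rfl [] [] b [] [] (Or.inl rfl)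
  simp only [pvInterp, List.flatten_nil, List.append_nil, ite_self, List.drop_zero] at hA hB
  simp only [hA, ← hB]
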